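-- pv_equiv track=rewrite | github.com/ShovalMishal/Anomaly_Detection_in_aerial_images | OOD_Upper_Bound/ood_and_id_dataset.py | generate_label_mappers
-- ===== SOURCE A (Python) =====
-- def generate_label_mappers(classes=None, ood_classes_names=None):
--     if ood_classes_names is None:
--         ood_classes_names = []
--     ood_indices = sorted([classes.index(ood_class_name) for ood_class_name in ood_classes_names if
--                           ood_class_name in classes])
--     custom_label_mapping = {i: i for i in range(len(classes))}
--     for i, curr_ind in enumerate(ood_indices):
--         value_to_switch = custom_label_mapping[curr_ind]
--         for j in range(curr_ind + 1, len(classes)):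
--             custom_label_mapping.update({j: value_to_switch})
--             value_to_switch += 1
--         custom_label_mapping.update({curr_ind: len(classes) - i - 1})
--     labels_to_classes_names = {custom_label_mapping[i]: classes[i] for i in range(len(classes))} # says after mapping what is the class
--     return custom_label_mapping, labels_to_classes_names
-- ===== SOURCE B (Python) =====
-- def generate_label_mappers(classes=None, ood_classes_names=None):
--     if ood_classes_names is None:
--         ood_classes_names = []
--     first_index = {}
--     for i, c in enumerate(classes):
--         if c not in first_index:
--             first_index[c] = i
--     ood_sorted = sorted({first_index[name] for name in ood_classes_names if name in first_index})
--     rank = {idx: r for r, idx in enumerate(ood_sorted)}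
--     n = len(classes)
--     custom_label_mapping = {}
--     seen = 0
--     for j in range(n):
--         if j in rank:
--             custom_label_mapping[j] = n - 1 - rank[j]
--             seen += 1
--         else:
--             custom_label_mapping[j] = j - seen
--     labels_to_classes_names = {custom_label_mapping[j]: classes[j] for j in range(n)}
--     return custom_label_mapping, labels_to_classes_names
-- ===== Notes on version B (the rewrite author's own statement) =====
-- stated objective: alternative
-- what changed: Replaces A's repeated list.index scans plus a full O(n) re-shifting pass over the whole mapping dict for every OOD occurrence with a first-occurrence index, a sorted deduplicated OOD index set with a rank dict, and one pass over range(n) assigning each label directly; Pre_ excludes inputs where ood_classes_names repeats a name present in classes, on which A's repeated shifting returns labels outside 0..len(classes)-1 (an artefact of its dict-update loop) while B counts each OOD class once.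
-- outside the precondition, e.g. on generate_label_mappers(['a'], ['a', 'a']): A returns ({0: -1}, {-1: 'a'}), B returns ({0: 0}, {0: 'a'})
import Mathlib
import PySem

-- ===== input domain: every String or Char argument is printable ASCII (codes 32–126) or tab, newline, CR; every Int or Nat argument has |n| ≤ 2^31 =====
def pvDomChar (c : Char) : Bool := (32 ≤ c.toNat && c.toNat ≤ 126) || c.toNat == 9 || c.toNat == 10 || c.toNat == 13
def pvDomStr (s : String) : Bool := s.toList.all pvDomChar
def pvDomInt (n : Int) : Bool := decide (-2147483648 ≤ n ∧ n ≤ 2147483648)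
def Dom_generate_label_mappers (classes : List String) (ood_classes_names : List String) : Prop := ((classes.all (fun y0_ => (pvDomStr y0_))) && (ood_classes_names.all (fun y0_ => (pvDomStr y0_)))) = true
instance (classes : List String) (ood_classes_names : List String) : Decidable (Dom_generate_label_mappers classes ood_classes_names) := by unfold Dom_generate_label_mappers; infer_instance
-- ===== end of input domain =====

-- B replaces A's repeated list.index scans and per-OOD-index re-shifting pass over the whole
-- mapping dict with a first-occurrence index, a sorted deduplicated OOD index list with its rank
-- dict, and ONE pass assigning each label directly (objective: alternative single-pass algorithm);
-- duplicate OOD names are excluded by Pre_ (see there).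

-- ===== PORT A =====
def generate_label_mappers (classes : List String) (ood_classes_names : List String) : (List (Int × Int)) × (List (Int × String)) :=
  -- [classes.index(x) for x in ood_classes_names if x in classes]; index? is some, since x ∈ classes
  let ood_indices : List Int :=
    PySem.List.sorted
      ((ood_classes_names.filter (fun nm => decide (nm ∈ classes))).map
        (fun nm => (((PySem.List.index? classes nm).getD 0 : Nat) : Int)))
      (fun x => x) false
  let n : Int := (classes.length : Int)
  let m0 : PySem.Dict Int Int :=
    (PySem.List.pyRange 0 n 1).foldl (fun d i => d.insert i i) PySem.Dict.empty
  let m1 : PySem.Dict Int Int :=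
    (PySem.List.enumerate ood_indices 0).foldl
      (fun d p =>
        -- custom_label_mapping[curr_ind]: the key 0 ≤ p.2 < n is always present (no KeyError)
        let value_to_switch := d.getD p.2 0
        let inner := (PySem.List.pyRange (p.2 + 1) n 1).foldl
          (fun (s : PySem.Dict Int Int × Int) j => (s.1.insert j s.2, s.2 + 1)) (d, value_to_switch)
        inner.1.insert p.2 (n - p.1 - 1)) m0
  -- classes[i] with 0 ≤ i < n is always in range (no IndexError)
  let labels : PySem.Dict Int String :=
    (PySem.List.pyRange 0 n 1).foldl
      (fun d i => d.insert (m1.getD i 0) (PySem.List.pyGetD classes i "")) PySem.Dict.empty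
  (m1.items, labels.items)

-- ===== PORT B =====
def generate_label_mappers_alt (classes : List String) (ood_classes_names : List String) : (List (Int × Int)) × (List (Int × String)) :=
  let first_index : PySem.Dict String Int :=
    (PySem.List.enumerate classes 0).foldl
      (fun d p => if d.contains p.2 then d else d.insert p.2 p.1) PySem.Dict.empty
  -- sorted({first_index[name] for name in ood_classes_names if name in first_index})
  let ood_sorted : List Int :=
    PySem.List.sorted
      (PySem.Set.ofList
        ((ood_classes_names.filter (fun nm => first_index.contains nm)).map
          (fun nm => first_index.getD nm 0)))
      (fun x => x) false
  let rank : PySem.Dict Int Int :=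
    (PySem.List.enumerate ood_sorted 0).foldl (fun d p => d.insert p.2 p.1) PySem.Dict.empty
  let n : Int := (classes.length : Int)
  let res : PySem.Dict Int Int × Int :=
    (PySem.List.pyRange 0 n 1).foldl
      (fun (s : PySem.Dict Int Int × Int) j =>
        if rank.contains j then
          -- rank[j]: the key is present (no KeyError)
          (s.1.insert j (n - 1 - rank.getD j 0), s.2 + 1)
        else (s.1.insert j (j - s.2), s.2))
      (PySem.Dict.empty, 0)
  let m := res.1
  -- classes[j] with 0 ≤ j < n is always in range
  let labels : PySem.Dict Int String :=
    (PySem.List.pyRange 0 n 1).foldl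
      (fun d i => d.insert (m.getD i 0) (PySem.List.pyGetD classes i "")) PySem.Dict.empty
  (m.items, labels.items)

-- ===== PRECONDITION & SPEC =====
-- Pre_ excludes the inputs on which ood_classes_names repeats a name that occurs in classes: there
-- A applies its shifting pass once per occurrence and returns labels outside 0..len(classes)-1
-- (even negative), an artefact of its dict-update loop that no remapping should match; B counts
-- each OOD class once there.
def Pre_generate_label_mappers (classes : List String) (ood_classes_names : List String) : Prop :=
  (ood_classes_names.inter classes).Nodup
instance (classes : List String) (ood_classes_names : List String) : Decidable (Pre_generate_label_mappers classes ood_classes_names) := by unfold Pre_generate_label_mappers; infer_instance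

def pvWitness_generate_label_mappers : List String × List String := (["a", "b", "c"], ["b"])

def Spec_generate_label_mappers (classes : List String) (ood_classes_names : List String) (out : (List (Int × Int)) × (List (Int × String))) : Prop := out = generate_label_mappers_alt classes ood_classes_names
instance (classes : List String) (ood_classes_names : List String) (out : (List (Int × Int)) × (List (Int × String))) : Decidable (Spec_generate_label_mappers classes ood_classes_names out) := by unfold Spec_generate_label_mappers; infer_instance

-- ===== CLAIM (what is proved, stated in full; the proofs are below) =====
def Claim_equal_generate_label_mappers : Prop := ∀ (classes : List String) (ood_classes_names : List String), Dom_generate_label_mappers classes ood_classes_names → Pre_generate_label_mappers classes ood_classes_names → Spec_generate_label_mappers classes ood_classes_names (generate_label_mappers classes ood_classes_names)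

-- ===== LEMMAS AND PROOFS =====

-- a dict whose items are exactly {j : g j for j in range(n)}
def pvRmap (n : Int) (g : Int → Int) : PySem.Dict Int Int :=
  PySem.Dict.mk ((PySem.List.pyRange 0 n 1).map (fun j => (j, g j)))

theorem pvRmap_contains (n k : Int) (g : Int → Int) :
    (pvRmap n g).contains k = decide (0 ≤ k ∧ k < n) := by
  simp only [pvRmap, PySem.Dict.contains]
  rw [Bool.eq_iff_iff]
  simp only [List.any_eq_true, decide_eq_true_eq]
  constructor
  · rintro ⟨x, hx, h3⟩
    obtain ⟨j, hj, rfl⟩ := List.mem_map.mp hx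
    rw [PySem.List.mem_pyRange_one] at hj
    simp only [beq_iff_eq] at h3
    omega
  · rintro ⟨h1, h2⟩
    refine ⟨(k, g k), List.mem_map.mpr ⟨k, ?_, rfl⟩, by simp⟩
    rw [PySem.List.mem_pyRange_one]; exact ⟨h1, h2⟩

theorem pvRmap_congr (n : Int) (g g' : Int → Int)
    (h : ∀ j, 0 ≤ j → j < n → g j = g' j) : pvRmap n g = pvRmap n g' := by
  unfold pvRmap
  congr 1
  apply List.map_congr_left
  intro j hj
  rw [PySem.List.mem_pyRange_one] at hj
  rw [h j hj.1 hj.2]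

theorem pvRmap_insert (n k : Int) (g : Int → Int) (v : Int) (h0 : 0 ≤ k) (h1 : k < n) :
    (pvRmap n g).insert k v = pvRmap n (fun j => if j = k then v else g j) := by
  have hc : (pvRmap n g).contains k = true := by
    rw [pvRmap_contains]; simp; exact ⟨h0, h1⟩
  unfold PySem.Dict.insert
  rw [hc, if_pos rfl]
  simp only [pvRmap, PySem.Dict.mk.injEq, List.map_map]
  apply List.map_congr_left
  intro j hj
  by_cases h : j = k <;> simp [h]

theorem pvRmap_insert_top (n : Int) (g : Int → Int) (v : Int) (h0 : 0 ≤ n) :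
    (pvRmap n g).insert n v = pvRmap (n + 1) (fun j => if j = n then v else g j) := by
  have hc : (pvRmap n g).contains n = false := by
    rw [pvRmap_contains]; simp
  unfold PySem.Dict.insert
  rw [hc, if_neg (by simp)]
  simp only [pvRmap, PySem.Dict.mk.injEq]
  rw [PySem.List.pyRange_one_succ_right h0, List.map_append]
  simp only [List.map_cons, List.map_nil]
  congr 1
  apply List.map_congr_left
  intro j hj
  rw [PySem.List.mem_pyRange_one] at hj
  have : j ≠ n := by omega
  simp [this]

theorem pvRmap_keys_nodup (n : Int) (g : Int → Int) : (pvRmap n g).keys.Nodup := by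
  simp only [pvRmap, PySem.Dict.keys_mk, List.map_map]
  have : ((fun x => x.1) ∘ fun j => (j, g j) : Int → Int) = id := by funext j; rfl
  rw [this, List.map_id]
  exact PySem.List.nodup_pyRange_one 0 n

theorem pvRmap_getD (n k : Int) (g : Int → Int) (d0 : Int) (h0 : 0 ≤ k) (h1 : k < n) :
    (pvRmap n g).getD k d0 = g k := by
  have h : ((k : Int), g k) ∈ (pvRmap n g).items := by
    simp only [pvRmap, List.mem_map]
    exact ⟨k, by rw [PySem.List.mem_pyRange_one]; exact ⟨h0, h1⟩, rfl⟩
  exact PySem.Dict.getD_of_mem_items _ h (pvRmap_keys_nodup n g) d0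

theorem pvInit (m : Nat) :
    (PySem.List.pyRange 0 (m : Int) 1).foldl (fun d i => d.insert i i) PySem.Dict.empty
      = pvRmap (m : Int) (fun j => j) := by
  induction m with
  | zero => rfl
  | succ m ih =>
    have hcast : ((m + 1 : Nat) : Int) = (m : Int) + 1 := by push_cast; ring
    rw [hcast, PySem.List.pyRange_one_succ_right (by positivity), List.foldl_append, ih]
    simp only [List.foldl_cons, List.foldl_nil]
    rw [pvRmap_insert_top _ _ _ (by positivity)]
    apply pvRmap_congr
    intro j _ _
    by_cases h : j = (m : Int) <;> simp [h]

theorem pvInner (n : Int) : ∀ (t : Nat) (a : Int) (g : Int → Int) (v : Int), 0 ≤ a → (n - a).toNat = t →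
    ((PySem.List.pyRange a n 1).foldl
        (fun (s : PySem.Dict Int Int × Int) j => (s.1.insert j s.2, s.2 + 1)) (pvRmap n g, v)).1
      = pvRmap n (fun j => if a ≤ j then v + (j - a) else g j) := by
  intro t
  induction t with
  | zero =>
    intro a g v ha ht
    rw [PySem.List.pyRange_one_eq_nil (by omega)]
    simp only [List.foldl_nil]
    apply pvRmap_congr
    intro j h0 h1
    rw [if_neg (by omega)]
  | succ t ih =>
    intro a g v ha ht
    rw [PySem.List.pyRange_one_cons (by omega)]
    simp only [List.foldl_cons]
    rw [pvRmap_insert n a g v ha (by omega)]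
    rw [ih (a + 1) _ (v + 1) (by omega) (by omega)]
    apply pvRmap_congr
    intro j h0 h1
    split_ifs
    all_goals first | rfl | omega

def pvStepA (n t c : Int) (g : Int → Int) : Int → Int :=
  fun j => if j = c then n - t - 1 else if c + 1 ≤ j then g c + (j - (c + 1)) else g j

def pvApplyA (n : Int) : Int → (Int → Int) → List Int → (Int → Int)
  | _, g, [] => g
  | t, g, c :: rest => pvApplyA n (t + 1) (pvStepA n t c g) rest

theorem pvOuter (n : Int) : ∀ (L : List Int) (t : Int) (g : Int → Int), (∀ c ∈ L, 0 ≤ c ∧ c < n) →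
    (PySem.List.enumerate L t).foldl
      (fun d p =>
        let value_to_switch := d.getD p.2 0
        let inner := (PySem.List.pyRange (p.2 + 1) n 1).foldl
          (fun (s : PySem.Dict Int Int × Int) j => (s.1.insert j s.2, s.2 + 1)) (d, value_to_switch)
        inner.1.insert p.2 (n - p.1 - 1)) (pvRmap n g)
      = pvRmap n (pvApplyA n t g L) := by
  intro L
  induction L with
  | nil => intro t g _; rw [PySem.List.enumerate_nil]; rfl
  | cons c rest ih =>
    intro t g hb
    have hc0 := (hb c (by simp)).1
    have hc1 := (hb c (by simp)).2
    have hbrest : ∀ c' ∈ rest, 0 ≤ c' ∧ c' < n := fun c' hc' => hb c' (by simp [hc'])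
    rw [PySem.List.enumerate_cons]
    simp only [List.foldl_cons]
    rw [pvRmap_getD n c g 0 hc0 hc1]
    rw [pvInner n (n - (c+1)).toNat (c + 1) g (g c) (by omega) rfl]
    rw [pvRmap_insert n c _ (n - t - 1) hc0 hc1]
    rw [show (pvRmap n fun j => if j = c then n - t - 1 else if c + 1 ≤ j then g c + (j - (c + 1)) else g j) = pvRmap n (pvStepA n t c g) from rfl]
    exact ih (t + 1) (pvStepA n t c g) hbrest

theorem pvFI (classes : List String) : ∀ (nm : String),
    ((PySem.List.enumerate classes 0).foldl
      (fun d p => if d.contains p.2 then d else d.insert p.2 p.1) PySem.Dict.empty).get? nm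
    = (PySem.List.index? classes nm).map (fun k => (k : Int)) := by
  induction classes using List.reverseRecOn with
  | nil => intro nm; simp [PySem.List.enumerate_nil, PySem.List.index?_eq_idxOf?, PySem.Dict.get?_empty]
  | append_singleton cs c ih =>
    intro nm
    rw [PySem.List.enumerate_append, List.foldl_append]
    simp only [PySem.List.enumerate_cons, PySem.List.enumerate_nil, List.foldl_cons, List.foldl_nil]
    set FI := (PySem.List.enumerate cs 0).foldl
      (fun d p => if d.contains p.2 then d else d.insert p.2 p.1) PySem.Dict.empty with hFI
    have hcont : FI.contains c = (PySem.List.index? cs c).isSome := by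
      rw [PySem.Dict.contains_eq_isSome_get?, ih c]
      rcases PySem.List.index? cs c with _ | k <;> rfl
    by_cases hc : c ∈ cs
    · have hct : FI.contains c = true := by
        rw [hcont]; exact (PySem.List.index?_isSome_iff cs c).mpr hc
      rw [if_pos hct, ih nm]
      by_cases hnm : nm ∈ cs
      · rw [PySem.List.index?_append_of_mem [c] hnm]
      · have hnmc : nm ≠ c := fun h => hnm (h ▸ hc)
        rw [(PySem.List.index?_eq_none_iff cs nm).mpr hnm,
          (PySem.List.index?_eq_none_iff (cs ++ [c]) nm).mpr (by simp [hnm, hnmc])]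
    · have hcf : FI.contains c = false := by
        rw [hcont]
        rw [Bool.eq_false_iff]
        intro h
        exact hc ((PySem.List.index?_isSome_iff cs c).mp h)
      rw [if_neg (by simp [hcf])]
      by_cases hnmc : nm = c
      · subst hnmc
        rw [PySem.Dict.get?_insert_self, PySem.List.index?_append_singleton_self cs nm hc]
        simp
      · rw [PySem.Dict.get?_insert_of_ne _ _ hnmc, ih nm]
        by_cases hnm : nm ∈ cs
        · rw [PySem.List.index?_append_of_mem [c] hnm]
        · rw [(PySem.List.index?_eq_none_iff cs nm).mpr hnm,
            (PySem.List.index?_eq_none_iff (cs ++ [c]) nm).mpr (by simp [hnm, hnmc])]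

theorem pvCnt (S : List Int) (m : Int) :
    S.countP (fun x => decide (x < m + 1))
      = S.countP (fun x => decide (x < m)) + S.count m := by
  induction S with
  | nil => simp
  | cons a T ih =>
    rw [List.countP_cons, List.countP_cons, List.count_cons, ih]
    simp only [beq_iff_eq, decide_eq_true_eq]
    split_ifs <;> omega

theorem pvApplyA_append (n : Int) : ∀ (P Q : List Int) (t : Int) (g : Int → Int),
    pvApplyA n t g (P ++ Q) = pvApplyA n (t + P.length) (pvApplyA n t g P) Q := by
  intro P
  induction P with
  | nil => intro Q t g; simp [pvApplyA]
  | cons c rest ih =>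
    intro Q t g
    simp only [List.cons_append, pvApplyA, List.length_cons]
    rw [ih]
    congr 1
    push_cast
    ring

theorem pvApplyA_stable (n : Int) : ∀ (Q : List Int) (t : Int) (g : Int → Int) (j : Int),
    (∀ c ∈ Q, j < c) → pvApplyA n t g Q j = g j := by
  intro Q
  induction Q with
  | nil => intro t g j _; rfl
  | cons c rest ih =>
    intro t g j h
    have hc : j < c := h c (by simp)
    simp only [pvApplyA]
    rw [ih (t + 1) _ j (fun c' hc' => h c' (by simp [hc']))]
    unfold pvStepA
    rw [if_neg (by omega), if_neg (by omega)]

theorem pvApplyA_replicate (n : Int) : ∀ (μ : Nat) (t : Int) (g : Int → Int) (m : Int), 1 ≤ μ →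
    (pvApplyA n t g (List.replicate μ m) m = n - t - μ) ∧
    (∀ j, m < j → pvApplyA n t g (List.replicate μ m) j
        = j + (if μ = 1 then g m - m - 1 else n - t - (μ : Int) - m)) := by
  intro μ
  induction μ with
  | zero => intro _ _ _ h; omega
  | succ μ ih =>
    intro t g m _
    by_cases hμ : μ = 0
    · subst hμ
      constructor
      · rw [show List.replicate (0 + 1) m = [m] from rfl]
        simp only [pvApplyA]
        unfold pvStepA
        rw [if_pos rfl]
        push_cast; ring
      · intro j hj
        rw [show List.replicate (0 + 1) m = [m] from rfl]
        simp only [pvApplyA]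
        unfold pvStepA
        rw [if_neg (by omega : ¬ j = m), if_pos (by omega : m + 1 ≤ j), if_pos trivial]
        ring
    · have h1 : 1 ≤ μ := by omega
      rw [List.replicate_succ]
      simp only [pvApplyA]
      obtain ⟨ihm, ihj⟩ := ih (t + 1) (pvStepA n t m g) m h1
      constructor
      · rw [ihm]; push_cast; ring
      · intro j hj
        rw [ihj j hj]
        have hgm : pvStepA n t m g m = n - t - 1 := by
          unfold pvStepA; rw [if_pos rfl]
        rw [if_neg (by omega : ¬ μ + 1 = 1)]
        by_cases hμ1 : μ = 1
        · rw [if_pos hμ1, hgm, hμ1]; push_cast; ring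
        · rw [if_neg hμ1]; push_cast; ring

theorem pvSplit : ∀ (S : List Int), S.Pairwise (· ≤ ·) → ∀ (v : Int),
    S = S.filter (fun x => decide (x < v)) ++ List.replicate (S.count v) v
        ++ S.filter (fun x => decide (v < x)) := by
  intro S
  induction S with
  | nil => intro _ v; simp
  | cons a T ih =>
    intro hp v
    have ha : ∀ b ∈ T, a ≤ b := (List.pairwise_cons.mp hp).1
    have hT := ih (List.pairwise_cons.mp hp).2
    simp only [List.filter_cons, List.count_cons]
    rcases lt_trichotomy a v with h | h | h
    · have e1 : decide (a < v) = true := by simpa using h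
      have e2 : decide (v < a) = false := by simp; omega
      have e3 : (a == v) = false := by simp; omega
      rw [e1, e2, e3]
      simp only [if_neg (by simp : ¬ false = true), Nat.add_zero]
      conv_lhs => rw [hT v]
      simp
    · subst h
      have e1 : decide (a < a) = false := by simp
      have e3 : (a == a) = true := by simp
      rw [e1, e3]
      simp only [if_pos trivial, if_neg (by simp : ¬ false = true)]
      have hfil : T.filter (fun x => decide (x < a)) = [] := by
        rw [List.filter_eq_nil_iff]
        intro b hb
        simpa using not_lt.mpr (ha b hb)
      have hTa := hT a
      rw [hfil] at hTa
      rw [List.replicate_succ]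
      conv_lhs => rw [hTa]
      simp
      exact ha
    · have e1 : decide (a < v) = false := by simp; omega
      have e2 : decide (v < a) = true := by simpa using h
      have e3 : (a == v) = false := by simp; omega
      rw [e1, e2, e3]
      simp only [if_neg (by simp : ¬ false = true)]
      have hcnt : T.count v = 0 := by
        rw [List.count_eq_zero]
        intro hv
        exact absurd (ha v hv) (by omega)
      have hfil : T.filter (fun x => decide (x < v)) = [] := by
        rw [List.filter_eq_nil_iff]
        intro b hb
        have := ha b hb
        simp only [decide_eq_true_eq]
        omega
      have hfil2 : T.filter (fun x => decide (v < x)) = T := by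
        rw [List.filter_eq_self]
        intro b hb
        have := ha b hb
        simp only [decide_eq_true_eq]
        omega
      rw [hcnt, hfil, hfil2]
      simp

theorem pvGvalMem (n : Int) (S : List Int) (hs : S.Pairwise (· ≤ ·)) (j : Int) (hj : j ∈ S) :
    pvApplyA n 0 (fun x => x) S j
      = n - (S.countP (fun x => decide (x < j)) : Int) - (S.count j : Int) := by
  have hμ : 1 ≤ S.count j := List.count_pos_iff.mpr hj
  conv_lhs => rw [pvSplit S hs j]
  rw [pvApplyA_append, pvApplyA_append, pvApplyA_stable]
  · rw [(pvApplyA_replicate n (S.count j) _ _ j hμ).1]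
    rw [List.countP_eq_length_filter]
    ring
  · intro c hc
    rw [List.mem_filter] at hc
    simpa using hc.2

def pvOff (n : Int) (S : List Int) : Nat → Int
  | 0 => 0
  | m + 1 =>
    if S.count (m : Int) = 0 then pvOff n S m
    else if S.count (m : Int) = 1 then pvOff n S m - 1
    else n - (S.countP (fun x => decide (x < (m : Int))) : Int) - (S.count (m : Int) : Int) - (m : Int)

theorem pvFilterSucc (S : List Int) (hs : S.Pairwise (· ≤ ·)) (m : Int) :
    S.filter (fun x => decide (x < m + 1))
      = S.filter (fun x => decide (x < m)) ++ List.replicate (S.count m) m := by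
  set T := S.filter (fun x => decide (x < m + 1)) with hT
  have hTp : T.Pairwise (· ≤ ·) := List.Pairwise.sublist List.filter_sublist hs
  have h1 : T.filter (fun x => decide (x < m)) = S.filter (fun x => decide (x < m)) := by
    rw [hT, List.filter_filter]
    apply List.filter_congr
    intro x _
    by_cases h : x < m
    · simp [h, show x < m + 1 by omega]
    · simp [h]
  have h2 : T.count m = S.count m := List.count_filter (by simp)
  have h3 : T.filter (fun x => decide (m < x)) = [] := by
    rw [List.filter_eq_nil_iff]
    intro b hb
    rw [hT, List.mem_filter] at hb
    have := hb.2
    simp only [decide_eq_true_eq] at this ⊢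
    omega
  have := pvSplit T hTp m
  rw [h1, h2, h3] at this
  simpa using this

theorem pvL (n : Int) (S : List Int) (hs : S.Pairwise (· ≤ ·)) (hb : ∀ c ∈ S, 0 ≤ c) :
    ∀ (m : Nat) (j : Int), (m : Int) ≤ j →
    pvApplyA n 0 (fun x => x) (S.filter (fun x => decide (x < (m : Int)))) j
      = j + pvOff n S m := by
  intro m
  induction m with
  | zero =>
    intro j _
    simp only [Nat.cast_zero]
    have : S.filter (fun x => decide (x < (0 : Int))) = [] := by
      rw [List.filter_eq_nil_iff]
      intro b hb'
      simpa using not_lt.mpr (hb b hb')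
    rw [this]
    simp [pvApplyA, pvOff]
  | succ m ih =>
    intro j hj
    have hcast : ((m + 1 : Nat) : Int) = (m : Int) + 1 := by push_cast; ring
    rw [hcast, pvFilterSucc S hs (m : Int)]
    by_cases h0 : S.count (m : Int) = 0
    · rw [h0]
      simp only [List.replicate_zero, List.append_nil]
      rw [ih j (by omega)]
      simp [pvOff, h0]
    · rw [pvApplyA_append]
      have hlen : (S.filter (fun x => decide (x < (m : Int)))).length
          = S.countP (fun x => decide (x < (m : Int))) := by
        simp [List.countP_eq_length_filter]
      have hrep := pvApplyA_replicate n (S.count (m : Int))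
        (0 + ((S.filter (fun x => decide (x < (m : Int)))).length : Int))
        (pvApplyA n 0 (fun x => x) (S.filter (fun x => decide (x < (m : Int))))) (m : Int)
        (by omega)
      rw [hrep.2 j (by omega)]
      rw [ih (m : Int) le_rfl]
      simp only [pvOff]
      rw [if_neg h0]
      by_cases h1 : S.count (m : Int) = 1
      · rw [if_pos h1, if_pos h1]
        ring
      · rw [if_neg h1, if_neg h1, hlen]
        ring

theorem pvGvalNot (n : Int) (S : List Int) (hs : S.Pairwise (· ≤ ·))
    (hb : ∀ c ∈ S, 0 ≤ c) (j : Int) (h0 : 0 ≤ j) (hj : j ∉ S) :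
    pvApplyA n 0 (fun x => x) S j = j + pvOff n S j.toNat := by
  have hc0 : S.count j = 0 := List.count_eq_zero.mpr hj
  conv_lhs => rw [pvSplit S hs j]
  rw [hc0]
  simp only [List.replicate_zero, List.append_nil]
  rw [pvApplyA_append, pvApplyA_stable]
  · have hcast : ((j.toNat : Nat) : Int) = j := Int.toNat_of_nonneg h0
    have := pvL n S hs hb j.toNat j (by omega)
    rw [hcast] at this
    exact this
  · intro c hc
    rw [List.mem_filter] at hc
    simpa using hc.2

-- pvOff under a duplicate-free S is just minus the number of smaller elements
theorem pvOffNodup (n : Int) (S : List Int) (hnd : S.Nodup) (hb : ∀ c ∈ S, 0 ≤ c) :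
    ∀ (m : Nat), pvOff n S m = -(S.countP (fun x => decide (x < (m : Int))) : Int) := by
  intro m
  induction m with
  | zero =>
    have h0 : S.countP (fun x => decide (x < (0 : Int))) = 0 := by
      rw [List.countP_eq_zero]
      intro c hc
      simpa using not_lt.mpr (hb c hc)
    simp only [pvOff, Nat.cast_zero, h0]
    simp
  | succ m ih =>
    have hle : S.count ((m : Nat) : Int) ≤ 1 := List.nodup_iff_count_le_one.mp hnd _
    have hcast : (((m + 1 : Nat)) : Int) = ((m : Nat) : Int) + 1 := by push_cast; ring
    have hcnt := pvCnt S ((m : Nat) : Int)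
    simp only [pvOff]
    by_cases h0 : S.count ((m : Nat) : Int) = 0
    · rw [if_pos h0, ih, hcast, hcnt, h0]
      norm_num
    · have h1 : S.count ((m : Nat) : Int) = 1 := by omega
      rw [if_neg h0, if_pos h1, ih, hcast, hcnt, h1]
      push_cast
      ring

-- the rank dict of a duplicate-free list: get? is index?
theorem pvRank (S : List Int) (hnd : S.Nodup) : ∀ (j : Int),
    ((PySem.List.enumerate S 0).foldl (fun d p => d.insert p.2 p.1) PySem.Dict.empty).get? j
      = (PySem.List.index? S j).map (fun k => (k : Int)) := by
  induction S using List.reverseRecOn with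
  | nil => intro j; simp [PySem.List.enumerate_nil, PySem.List.index?_eq_idxOf?, PySem.Dict.get?_empty]
  | append_singleton cs c ih =>
    intro j
    have hnd' : cs.Nodup := (List.nodup_append.mp hnd).1
    have hc : c ∉ cs := (List.nodup_cons.mp (List.nodup_append_comm.mp hnd)).1
    rw [PySem.List.enumerate_append, List.foldl_append]
    simp only [PySem.List.enumerate_cons, PySem.List.enumerate_nil, List.foldl_cons, List.foldl_nil]
    by_cases hjc : j = c
    · subst hjc
      rw [PySem.Dict.get?_insert_self, PySem.List.index?_append_singleton_self cs j hc]
      simp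
    · rw [PySem.Dict.get?_insert_of_ne _ _ hjc, ih hnd' j]
      by_cases hj : j ∈ cs
      · rw [PySem.List.index?_append_of_mem [c] hj]
      · rw [(PySem.List.index?_eq_none_iff cs j).mpr hj,
          (PySem.List.index?_eq_none_iff (cs ++ [c]) j).mpr (by simp [hj, hjc])]

-- in a strictly increasing list, the index of a member is the number of smaller elements
theorem pvIdxCount (S : List Int) (hp : S.Pairwise (· < ·)) (j : Int) (k : Nat)
    (hk : PySem.List.index? S j = some k) :
    S.countP (fun x => decide (x < j)) = k := by
  obtain ⟨pre, suf, hS, hlen, hjpre⟩ := (PySem.List.index?_eq_some_iff S j k).mp hk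
  subst hS
  have hsplit := List.pairwise_append.mp hp
  have hpre : ∀ a ∈ pre, a < j := fun a ha => hsplit.2.2 a ha j (by simp)
  have hsuf : ∀ b ∈ suf, ¬ (b < j) := by
    intro b hb
    have := (List.pairwise_cons.mp hsplit.2.1).1 b hb
    omega
  rw [List.countP_append, List.countP_cons]
  have h1 : pre.countP (fun x => decide (x < j)) = pre.length :=
    List.countP_eq_length.mpr (fun a ha => by simpa using hpre a ha)
  have h2 : (j :: suf).countP (fun x => decide (x < j)) = 0 := by
    rw [List.countP_eq_zero]
    intro b hb
    rcases List.mem_cons.mp hb with rfl | hb'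
    · exact fun h => absurd (of_decide_eq_true h) (lt_irrefl b)
    · simpa using hsuf b hb'
  rw [List.countP_cons] at h2
  omega

-- B's single pass, characterised: after m steps the dict is {j : gB j} and seen = countP (< m)
theorem pvBloop (n : Int) (S : List Int) (hp : S.Pairwise (· < ·))
    (hb : ∀ c ∈ S, 0 ≤ c ∧ c < n) (R : PySem.Dict Int Int)
    (hRc : ∀ x : Int, R.contains x = decide (x ∈ S))
    (hRg : ∀ x : Int, x ∈ S → R.getD x 0 = (S.countP (fun y => decide (y < x)) : Int)) :
    ∀ (m : Nat), (m : Int) ≤ n →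
    (PySem.List.pyRange 0 (m : Int) 1).foldl
      (fun (s : PySem.Dict Int Int × Int) j =>
        if R.contains j then (s.1.insert j (n - 1 - R.getD j 0), s.2 + 1)
        else (s.1.insert j (j - s.2), s.2))
      (PySem.Dict.empty, 0)
    = (pvRmap (m : Int)
        (fun j => if j ∈ S then n - 1 - (S.countP (fun y => decide (y < j)) : Int)
                  else j - (S.countP (fun y => decide (y < j)) : Int)),
       (S.countP (fun x => decide (x < (m : Int))) : Int)) := by
  intro m
  induction m with
  | zero =>
    intro _
    have hc : S.countP (fun x => decide (x < (0 : Int))) = 0 := by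
      rw [List.countP_eq_zero]
      intro c hc
      simpa using not_lt.mpr (hb c hc).1
    simp [hc, pvRmap, PySem.List.pyRange_one_eq_nil, PySem.Dict.empty]
  | succ m ih =>
    intro hle
    have hml : (m : Int) ≤ n := by push_cast at hle ⊢; omega
    have hnd : S.Nodup := hp.nodup
    have hcast : ((m + 1 : Nat) : Int) = (m : Int) + 1 := by push_cast; ring
    rw [hcast, PySem.List.pyRange_one_succ_right (by positivity), List.foldl_append, ih hml]
    simp only [List.foldl_cons, List.foldl_nil]
    have hcnt := pvCnt S ((m : Nat) : Int)
    by_cases hm : ((m : Nat) : Int) ∈ S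
    · have hcm : S.count ((m : Nat) : Int) = 1 := by
        have := List.nodup_iff_count_le_one.mp hnd ((m : Nat) : Int)
        have := List.count_pos_iff.mpr hm
        omega
      rw [if_pos (by rw [hRc]; simpa using hm)]
      rw [hRg _ hm]
      rw [pvRmap_insert_top (m : Int) _ _ (by positivity)]
      refine Prod.ext ?_ ?_
      · dsimp only
        apply pvRmap_congr
        intro j _ _
        by_cases hj : j = (m : Int)
        · subst hj
          rw [if_pos rfl, if_pos hm]
        · rw [if_neg hj]
      · dsimp only
        rw [hcnt, hcm]
        push_cast
        ring
    · have hcm : S.count ((m : Nat) : Int) = 0 := List.count_eq_zero.mpr hm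
      rw [if_neg (by rw [hRc]; simpa using hm)]
      rw [pvRmap_insert_top (m : Int) _ _ (by positivity)]
      refine Prod.ext ?_ ?_
      · dsimp only
        apply pvRmap_congr
        intro j _ _
        by_cases hj : j = (m : Int)
        · subst hj
          rw [if_pos rfl, if_neg hm]
        · rw [if_neg hj]
      · dsimp only
        rw [hcnt, hcm]
        push_cast
        ring

theorem pvListsEq (classes ood_classes_names : List String) :
    ((ood_classes_names.filter (fun nm =>
        ((PySem.List.enumerate classes 0).foldl
          (fun d p => if d.contains p.2 then d else d.insert p.2 p.1) PySem.Dict.empty).contains nm)).map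
      (fun nm => ((PySem.List.enumerate classes 0).foldl
          (fun d p => if d.contains p.2 then d else d.insert p.2 p.1) PySem.Dict.empty).getD nm 0))
    = (ood_classes_names.filter (fun nm => decide (nm ∈ classes))).map
        (fun nm => (((PySem.List.index? classes nm).getD 0 : Nat) : Int)) := by
  set FI := (PySem.List.enumerate classes 0).foldl
      (fun d p => if d.contains p.2 then d else d.insert p.2 p.1) PySem.Dict.empty with hFI
  have hfilter : ood_classes_names.filter (fun nm => FI.contains nm)
      = ood_classes_names.filter (fun nm => decide (nm ∈ classes)) := by
    apply List.filter_congr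
    intro nm _
    rw [PySem.Dict.contains_eq_isSome_get?, pvFI classes nm]
    rcases h : PySem.List.index? classes nm with _ | k
    · have : nm ∉ classes := (PySem.List.index?_eq_none_iff classes nm).mp h
      simp [this]
    · have : nm ∈ classes := (PySem.List.index?_isSome_iff classes nm).mp (by rw [h]; rfl)
      simp [this]
  rw [hfilter]
  apply List.map_congr_left
  intro nm hnm
  have hmem : nm ∈ classes := by
    have := List.mem_filter.mp hnm
    simpa using this.2
  obtain ⟨k, hk⟩ := Option.isSome_iff_exists.mp ((PySem.List.index?_isSome_iff classes nm).mpr hmem)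
  rw [PySem.Dict.getD, pvFI classes nm, hk]
  rfl

-- distinct OOD names in classes have distinct first indices
theorem pvAListNodup (classes ood_classes_names : List String)
    (hnd : (ood_classes_names.filter (fun nm => decide (nm ∈ classes))).Nodup) :
    ((ood_classes_names.filter (fun nm => decide (nm ∈ classes))).map
      (fun nm => (((PySem.List.index? classes nm).getD 0 : Nat) : Int))).Nodup := by
  apply List.Nodup.map_on _ hnd
  intro x hx y hy hxy
  have hxm : x ∈ classes := by simpa using (List.mem_filter.mp hx).2
  have hym : y ∈ classes := by simpa using (List.mem_filter.mp hy).2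
  obtain ⟨kx, hkx⟩ := Option.isSome_iff_exists.mp ((PySem.List.index?_isSome_iff classes x).mpr hxm)
  obtain ⟨ky, hky⟩ := Option.isSome_iff_exists.mp ((PySem.List.index?_isSome_iff classes y).mpr hym)
  obtain ⟨hlx, hgx, _⟩ := PySem.List.getElem_of_index?_eq_some hkx
  obtain ⟨hly, hgy, _⟩ := PySem.List.getElem_of_index?_eq_some hky
  rw [hkx, hky] at hxy
  simp only [Option.getD_some, Nat.cast_inj] at hxy
  subst hxy
  rw [← hgx, ← hgy]

-- the OOD names occurring in classes, as a List.inter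
theorem pvDbridge (classes ood_classes_names : List String) :
    ood_classes_names.inter classes
      = ood_classes_names.filter (fun nm => decide (nm ∈ classes)) := by
  show List.filter _ _ = _
  apply List.filter_congr
  intro x _
  simp

theorem pvMain (classes ood_classes_names : List String)
    (hD : (ood_classes_names.filter (fun nm => decide (nm ∈ classes))).Nodup) :
    generate_label_mappers classes ood_classes_names
      = generate_label_mappers_alt classes ood_classes_names := by
  unfold generate_label_mappers generate_label_mappers_alt
  dsimp only
  rw [pvListsEq classes ood_classes_names]
  simp only [PySem.Set.ofList_eq_self_of_nodup _ (pvAListNodup classes ood_classes_names hD)]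
  set AList := (ood_classes_names.filter (fun nm => decide (nm ∈ classes))).map
      (fun nm => (((PySem.List.index? classes nm).getD 0 : Nat) : Int)) with hAList
  have hAnd : AList.Nodup := pvAListNodup classes ood_classes_names hD
  set S := PySem.List.sorted AList (fun x => x) false with hS
  set n : Int := (classes.length : Int) with hn
  have hAb : ∀ c ∈ AList, 0 ≤ c ∧ c < n := by
    intro c hc
    rw [hAList] at hc
    obtain ⟨nm, hnm, rfl⟩ := List.mem_map.mp hc
    have hmem : nm ∈ classes := by simpa using (List.mem_filter.mp hnm).2
    obtain ⟨k, hk⟩ := Option.isSome_iff_exists.mp ((PySem.List.index?_isSome_iff classes nm).mpr hmem)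
    obtain ⟨hlt, _, _⟩ := PySem.List.getElem_of_index?_eq_some hk
    rw [hk]
    simp only [Option.getD_some]
    constructor
    · positivity
    · rw [hn]; exact_mod_cast hlt
  have hSperm : S.Perm AList := PySem.List.sorted_perm AList (fun x => x) false
  have hSb : ∀ c ∈ S, 0 ≤ c ∧ c < n := fun c hc => hAb c (hSperm.mem_iff.mp hc)
  have hs : S.Pairwise (· ≤ ·) := PySem.List.sorted_pairwise AList (fun x => x)
  have hSnd : S.Nodup := hSperm.nodup_iff.mpr hAnd
  have hp : S.Pairwise (· < ·) := by
    have := List.Pairwise.and hs (List.nodup_iff_pairwise_ne.mp hSnd)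
    exact this.imp (fun h => lt_of_le_of_ne h.1 h.2)
  set R : PySem.Dict Int Int :=
    (PySem.List.enumerate S 0).foldl (fun d p => d.insert p.2 p.1) PySem.Dict.empty with hR
  have hRget := pvRank S hSnd
  have hRc : ∀ x : Int, R.contains x = decide (x ∈ S) := by
    intro x
    rw [PySem.Dict.contains_eq_isSome_get?, hRget x, Bool.eq_iff_iff]
    rcases h : PySem.List.index? S x with _ | k
    · have : x ∉ S := (PySem.List.index?_eq_none_iff S x).mp h
      simp [this]
    · have : x ∈ S := (PySem.List.index?_isSome_iff S x).mp (by rw [h]; rfl)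
      simp [this]
  have hRg : ∀ x : Int, x ∈ S → R.getD x 0 = (S.countP (fun y => decide (y < x)) : Int) := by
    intro x hx
    obtain ⟨k, hk⟩ := Option.isSome_iff_exists.mp ((PySem.List.index?_isSome_iff S x).mpr hx)
    rw [PySem.Dict.getD, hRget x, hk, pvIdxCount S hp x k hk]
    rfl
  -- A's mapping
  have hmapA :
      (PySem.List.enumerate S 0).foldl
        (fun d p =>
          let value_to_switch := d.getD p.2 0
          let inner := (PySem.List.pyRange (p.2 + 1) n 1).foldl
            (fun (s : PySem.Dict Int Int × Int) j => (s.1.insert j s.2, s.2 + 1)) (d, value_to_switch)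
          inner.1.insert p.2 (n - p.1 - 1))
        ((PySem.List.pyRange 0 n 1).foldl (fun d i => d.insert i i) PySem.Dict.empty)
      = pvRmap n (pvApplyA n 0 (fun x => x) S) := by
    rw [hn, pvInit classes.length, pvOuter n S 0 (fun j => j) hSb]
  -- B's mapping
  have hmapB :
      ((PySem.List.pyRange 0 n 1).foldl
        (fun (s : PySem.Dict Int Int × Int) j =>
          if R.contains j then (s.1.insert j (n - 1 - R.getD j 0), s.2 + 1)
          else (s.1.insert j (j - s.2), s.2))
        (PySem.Dict.empty, 0)).1
      = pvRmap n (fun j => if j ∈ S then n - 1 - (S.countP (fun y => decide (y < j)) : Int)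
                  else j - (S.countP (fun y => decide (y < j)) : Int)) := by
    rw [hn, pvBloop ((classes.length : Nat) : Int) S hp hSb R hRc hRg classes.length le_rfl]
  have hgeq : pvRmap n (pvApplyA n 0 (fun x => x) S)
      = pvRmap n (fun j => if j ∈ S then n - 1 - (S.countP (fun y => decide (y < j)) : Int)
                  else j - (S.countP (fun y => decide (y < j)) : Int)) := by
    apply pvRmap_congr
    intro j hj0 hjn
    by_cases hj : j ∈ S
    · rw [if_pos hj, pvGvalMem n S hs j hj]
      have hc1 : S.count j = 1 := by
        have := List.nodup_iff_count_le_one.mp hSnd j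
        have := List.count_pos_iff.mpr hj
        omega
      rw [hc1]
      push_cast
      ring
    · rw [if_neg hj, pvGvalNot n S hs (fun c hc => (hSb c hc).1) j hj0 hj]
      rw [pvOffNodup n S hSnd (fun c hc => (hSb c hc).1) j.toNat]
      rw [Int.toNat_of_nonneg hj0]
      ring
  rw [hmapA, hmapB, hgeq]

-- ===== VERDICT (by name: the statement is the Claim_ definition above) =====
theorem generate_label_mappers_spec : Claim_equal_generate_label_mappers := by
  intro classes ood_classes_names _ hpre
  have h := hpre
  rw [Pre_generate_label_mappers, pvDbridge] at h
  exact pvMain classes ood_classes_names h
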